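-- pv_equiv track=rewrite | github.com/LminWoo99/algorithm | 프로그래머스/주사위고르기.py | make_sum_list
-- ===== SOURCE A (Python) =====
-- from itertools import combinations, product
--
-- def make_sum_list(choice, dice):
--     # choice [1,2,3,4,5]
--     sum_list = []
--     for pr in product([i for i in range(6)], repeat=len(choice)):  # 각 주사위의 idx 순열
--         sum = 0
--         for select_dice, idx in zip(choice, pr):
--             sum += dice[select_dice][idx]
--         sum_list.append(sum)
--
--     return sorted(sum_list)
-- ===== SOURCE B (Python) =====
-- def make_sum_list(choice, dice):
--     # Grow partial sums die by die instead of enumerating the full index product.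
--     sums = [0]
--     for c in choice:
--         die = dice[c]
--         sums = [s + die[i] for s in sums for i in range(6)]
--     return sorted(sums)
-- ===== Notes on version B (the rewrite author's own statement) =====
-- stated objective: alternative
-- what changed: B replaces enumerating the full 6^k index product and re-summing each k-tuple with an iterative fold that grows a list of partial sums one die at a time.
import Mathlib
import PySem

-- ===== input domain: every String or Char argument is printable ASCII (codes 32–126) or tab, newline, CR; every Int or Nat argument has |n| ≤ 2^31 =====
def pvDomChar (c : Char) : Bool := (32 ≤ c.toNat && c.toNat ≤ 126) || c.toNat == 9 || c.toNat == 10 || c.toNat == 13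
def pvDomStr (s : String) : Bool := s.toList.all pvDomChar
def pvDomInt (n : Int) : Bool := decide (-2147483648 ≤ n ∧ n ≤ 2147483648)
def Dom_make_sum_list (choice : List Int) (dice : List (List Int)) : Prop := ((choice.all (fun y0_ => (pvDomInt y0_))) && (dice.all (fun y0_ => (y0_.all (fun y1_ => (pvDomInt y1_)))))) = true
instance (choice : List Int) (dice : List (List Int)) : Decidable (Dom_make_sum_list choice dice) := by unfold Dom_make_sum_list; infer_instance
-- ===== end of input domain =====

-- B grows a running list of partial sums die by die instead of enumerating the full
-- 6^k index product and re-summing each tuple (objective: alternative decomposition).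

-- ===== PORT A =====
-- itertools.product([0..5], repeat=n): all n-tuples over 0..5, first coordinate slowest
def pvProd6 : Nat → List (List Int)
  | 0 => [[]]
  | n+1 => (PySem.List.pyRange 0 6 1).flatMap (fun i => (pvProd6 n).map (fun pr => i :: pr))

def make_sum_list (choice : List Int) (dice : List (List Int)) : List Int :=
  PySem.List.sorted
    ((pvProd6 choice.length).foldl (fun acc pr =>
      acc ++ [(choice.zip pr).foldl
        (fun s p => s + PySem.List.pyGetD (PySem.List.pyGetD dice p.1 []) p.2 0) 0]) [])
    (fun x => x) false

-- ===== PORT B =====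
def make_sum_list_alt (choice : List Int) (dice : List (List Int)) : List Int :=
  PySem.List.sorted
    (choice.foldl (fun sums c =>
      sums.flatMap (fun s => (PySem.List.pyRange 0 6 1).map
        (fun i => s + PySem.List.pyGetD (PySem.List.pyGetD dice c []) i 0))) [0])
    (fun x => x) false

-- ===== PRECONDITION & SPEC =====
-- Pre_ excludes exactly the inputs where the Python raises IndexError: some chosen
-- index is out of range of dice, or a chosen die has fewer than 6 faces (both A and B
-- index faces 0..5 of every chosen die when choice is nonempty).
def Pre_make_sum_list (choice : List Int) (dice : List (List Int)) : Prop :=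
  ∀ c ∈ choice, (PySem.List.pyGet? dice c).isSome ∧
    6 ≤ ((PySem.List.pyGet? dice c).getD []).length
instance (choice : List Int) (dice : List (List Int)) : Decidable (Pre_make_sum_list choice dice) := by unfold Pre_make_sum_list; infer_instance
def pvWitness_make_sum_list : List Int × List (List Int) :=
  ([0, 1], [[1, 2, 3, 4, 5, 6], [2, 2, 2, 2, 2, 2]])

def Spec_make_sum_list (choice : List Int) (dice : List (List Int)) (out : List Int) : Prop := out = make_sum_list_alt choice dice
instance (choice : List Int) (dice : List (List Int)) (out : List Int) : Decidable (Spec_make_sum_list choice dice out) := by unfold Spec_make_sum_list; infer_instance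

-- ===== CLAIM (what is proved, stated in full; the proofs are below) =====
def Claim_equal_make_sum_list : Prop := ∀ (choice : List Int) (dice : List (List Int)), Dom_make_sum_list choice dice → Pre_make_sum_list choice dice → Spec_make_sum_list choice dice (make_sum_list choice dice)

-- ===== LEMMAS AND PROOFS =====

def pvVal (dice : List (List Int)) (p : Int × Int) : Int :=
  PySem.List.pyGetD (PySem.List.pyGetD dice p.1 []) p.2 0

-- Invariant of B's loop: starting from `sums`, processing `choice` yields, for every
-- starting partial sum s, s + (sum of the zipped values) over every tuple of pvProd6.
theorem pvFoldB_eq (dice : List (List Int)) (choice : List Int) (sums : List Int) :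
    choice.foldl (fun sums c =>
      sums.flatMap (fun s => (PySem.List.pyRange 0 6 1).map
        (fun i => s + PySem.List.pyGetD (PySem.List.pyGetD dice c []) i 0))) sums =
      sums.flatMap (fun s => (pvProd6 choice.length).map (fun pr =>
        s + (choice.zip pr).foldl (fun a p => a + pvVal dice p) 0)) := by
  induction choice generalizing sums with
  | nil => simp [pvProd6]
  | cons c cs ih =>
      simp only [List.foldl_cons, ih, pvProd6, List.length_cons]
      simp [List.flatMap_assoc, List.flatMap_map, List.map_flatMap, List.map_map,
        Function.comp_def, PySem.List.foldl_add, pvVal, add_assoc]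

-- ===== VERDICT (by name: the statement is the Claim_ definition above) =====
theorem make_sum_list_spec : Claim_equal_make_sum_list := by
  intro choice dice _ _
  unfold Spec_make_sum_list make_sum_list make_sum_list_alt
  have h := pvFoldB_eq dice choice [0]
  simp only [pvVal] at h
  rw [h, PySem.List.foldl_append_singleton_eq_map]
  simp [PySem.List.foldl_add]
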